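-- pv_equiv track=rewrite | github.com/saitatter/pylrcget | src/core/embed_lyrics.py | _strip_timestamps
-- ===== SOURCE A (Python) =====
-- def _strip_timestamps(lrc: str) -> str:
--     """Remove [mm:ss.xx] tokens from LRC to derive plain lyrics."""
--     out_lines: list[str] = []
--     for line in lrc.splitlines():
--         line = line.strip()
--         if not line:
--             continue
--         # Remove any leading [....] blocks (timestamps or tags) repeatedly.
--         while line.startswith("[") and "]" in line:
--             line = line.split("]", 1)[1].lstrip()
--         out_lines.append(line)
--     return "\n".join(out_lines).strip()
-- ===== SOURCE B (Python) =====
-- def _strip_timestamps(lrc: str) -> str: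
--     """Remove [mm:ss.xx] tokens from LRC to derive plain lyrics.
--
--     One forward scan per line: a tiny state machine computes where the lyric
--     text starts (after any leading closed [...] blocks and the whitespace
--     between them), then slices once - no repeated split/lstrip string copies.
--     """
--     out_lines: list[str] = []
--     for raw in lrc.splitlines():
--         line = raw.strip()
--         if not line:
--             continue
--         keep = 0          # start of the text to keep
--         open_ = False     # inside a not-yet-closed bracket block?
--         for i, c in enumerate(line):
--             if open_:
--                 if c == ']':
--                     open_ = False
--                     keep = i + 1
--             elif i == keep:
--                 if c == '[':
--                     open_ = True   # keep stays at the '[' until it closes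
--                 elif c.isspace():
--                     keep = i + 1
--         out_lines.append(line[keep:])
--     return "\n".join(out_lines).strip()
-- ===== Notes on version B (the rewrite author's own statement) =====
-- stated objective: alternative
-- what changed: A repeatedly re-splits and lstrips each line (one new string per leading [..] block); B makes a single forward character scan per line with a tiny state machine that computes the index where the lyric text starts and slices once.
import Mathlib
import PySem

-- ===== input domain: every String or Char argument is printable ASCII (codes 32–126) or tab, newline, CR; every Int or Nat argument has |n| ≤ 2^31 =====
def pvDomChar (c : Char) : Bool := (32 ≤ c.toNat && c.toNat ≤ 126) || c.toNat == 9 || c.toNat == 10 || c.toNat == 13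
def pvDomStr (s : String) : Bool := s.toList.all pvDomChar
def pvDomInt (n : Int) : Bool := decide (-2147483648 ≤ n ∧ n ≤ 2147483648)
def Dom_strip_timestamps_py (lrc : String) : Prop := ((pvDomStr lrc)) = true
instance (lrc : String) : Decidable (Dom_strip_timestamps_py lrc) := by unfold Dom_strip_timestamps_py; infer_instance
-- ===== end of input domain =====

-- B replaces A's repeated split/lstrip peeling of leading [..] blocks by a single
-- forward scan per line that computes the start index of the kept text, then slices
-- once (alternative decomposition; same return value).

-- ===== PORT A =====

-- helper lemmas cited by peelA's termination proof (decreasing_by), so they stay above the port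
theorem pvGoZero (l cur : List Char) (acc : List (List Char)) (f : Nat) :
    PySem.Chars.splitOnMax.go [']'] f 0 l cur acc = ((cur.reverse ++ l) :: acc).reverse := by
  cases f with
  | zero => simp [PySem.Chars.splitOnMax.go]
  | succ f => cases l <;> simp [PySem.Chars.splitOnMax.go]

theorem pvSplitGoChar (l cur : List Char) (acc : List (List Char)) (fuel : Nat) (hf : l.length < fuel) :
    PySem.Chars.splitOnMax.go [']'] fuel 1 l cur acc =
      (if ']' ∈ l then
        acc.reverse ++ [cur.reverse ++ l.takeWhile (· ≠ ']'), (l.dropWhile (· ≠ ']')).tail]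
      else acc.reverse ++ [cur.reverse ++ l]) := by
  induction l generalizing cur acc fuel with
  | nil =>
    cases fuel with
    | zero => omega
    | succ f => simp [PySem.Chars.splitOnMax.go]
  | cons c rest ih =>
    cases fuel with
    | zero => omega
    | succ f =>
      rw [PySem.Chars.splitOnMax.go]
      by_cases hc : c = ']'
      · subst hc
        simp [pvGoZero, List.takeWhile, List.dropWhile]
      · have hpre : [']'].isPrefixOf (c :: rest) = false := by
          simp [List.isPrefixOf]; exact fun h => (hc h.symm).elim
        simp only [hpre, if_neg (by omega : ¬ (1:Nat) = 0)]
        rw [ih (c :: cur) acc f (by simp at hf ⊢; omega)]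
        by_cases hm : ']' ∈ rest
        · have : ']' ∈ c :: rest := List.mem_cons_of_mem _ hm
          simp [hm, this, List.takeWhile_cons, List.dropWhile_cons, hc]
        · have : ¬ ']' ∈ c :: rest := by simp [hc, hm]; exact fun h => hc h.symm
          simp [hm, this]

theorem pvIsInMem (c : Char) (s : List Char) : PySem.Chars.isIn [c] s = true ↔ c ∈ s := by
  rw [PySem.Chars.isIn_iff_infix]
  constructor
  · intro h; exact h.sublist.subset (by simp)
  · intro h
    obtain ⟨p, q, rfl⟩ := List.append_of_mem h
    exact ⟨p, q, by simp⟩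

theorem pvSplitChar (line : List Char) (h : ']' ∈ line) :
    PySem.Chars.splitOnMax line [']'] 1 =
      [line.takeWhile (· ≠ ']'), (line.dropWhile (· ≠ ']')).tail] := by
  unfold PySem.Chars.splitOnMax
  rw [if_neg (by norm_num)]
  norm_num
  rw [pvSplitGoChar _ _ _ _ (by omega)]
  simp [h]

theorem pvPeelArgLen (line : List Char) (h : PySem.Chars.isIn [']'] line = true) :
    (PySem.Chars.lstrip
      ((PySem.List.pyGet? (PySem.Chars.splitOnMax line [']'] 1) 1).getD [])).length
      < line.length := by
  have hm : ']' ∈ line := (pvIsInMem _ _).mp h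
  rw [pvSplitChar line hm]
  have h2 : (PySem.List.pyGet? [line.takeWhile (· ≠ ']'), (line.dropWhile (· ≠ ']')).tail] (1:Int)).getD []
      = (line.dropWhile (· ≠ ']')).tail := by
    simp [PySem.List.pyGet?, PySem.List.pyIdx?]
  rw [h2]
  have hne : line.dropWhile (· ≠ ']') ≠ [] := by
    intro he
    have := List.takeWhile_append_dropWhile (p := (· ≠ ']')) (l := line)
    rw [he, List.append_nil] at this
    have := List.mem_takeWhile_imp (l := line) (p := (· ≠ ']')) (by rw [this]; exact hm)
    simp at this
  have h3 : (PySem.Chars.lstrip ((line.dropWhile (· ≠ ']')).tail)).length ≤ ((line.dropWhile (· ≠ ']')).tail).length :=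
    List.length_dropWhile_le _ _
  have h4 := List.length_dropWhile_le (p := (· ≠ ']')) (l := line)
  have h5 : ((line.dropWhile (· ≠ ']')).tail).length = (line.dropWhile (· ≠ ']')).length - 1 := List.length_tail
  have h6 : 0 < (line.dropWhile (· ≠ ']')).length := List.length_pos_of_ne_nil hne
  omega

-- while line.startswith("[") and "]" in line: line = line.split("]", 1)[1].lstrip()
def peelA (line : List Char) : List Char :=
  if h : (PySem.Chars.startswith line ['['] && PySem.Chars.isIn [']'] line) = true then
    -- the guard ensures the split has a part [1]; `.getD []` is unreachable padding
    peelA (PySem.Chars.lstrip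
      ((PySem.List.pyGet? (PySem.Chars.splitOnMax line [']'] 1) 1).getD []))
  else line
termination_by line.length
decreasing_by
  exact pvPeelArgLen line (by simp at h; exact h.2)

def strip_timestamps_py (lrc : String) : String :=
  let outLines := (PySem.Chars.splitlines lrc.toList).foldl
    (fun acc rawLine =>
      let line := PySem.Chars.strip rawLine
      if line = [] then acc else acc ++ [peelA line]) []
  String.ofList (PySem.Chars.strip (PySem.Chars.join ['\n'] outLines))

-- ===== PORT B =====

-- one step of Source B's per-character state machine (state = (keep, open_))
def pvStepB (st : Int × Bool) (p : Int × Char) : Int × Bool :=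
  if st.2 then
    (if p.2 = ']' then (p.1 + 1, false) else st)
  else if p.1 = st.1 then
    (if p.2 = '[' then (st.1, true)
     else if PySem.Chars.isspace p.2 then (p.1 + 1, false)
     else st)
  else st

-- _cut(line): scan once, then slice line[keep:]
def cutB (line : List Char) : List Char :=
  let st := (PySem.List.enumerate line).foldl pvStepB (0, false)
  PySem.Chars.slice line (some st.1) none

def strip_timestamps_py_alt (lrc : String) : String :=
  let lines := (PySem.Chars.splitlines lrc.toList).map PySem.Chars.strip
  let outLines := (lines.filter (fun l => !l.isEmpty)).map cutB
  String.ofList (PySem.Chars.strip (PySem.Chars.join ['\n'] outLines))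

-- ===== PRECONDITION & SPEC =====
def Spec_strip_timestamps_py (lrc : String) (out : String) : Prop := out = strip_timestamps_py_alt lrc
instance (lrc : String) (out : String) : Decidable (Spec_strip_timestamps_py lrc out) := by unfold Spec_strip_timestamps_py; infer_instance

-- ===== CLAIM (what is proved, stated in full; the proofs are below) =====
def Claim_equal_strip_timestamps_py : Prop := ∀ (lrc : String), Dom_strip_timestamps_py lrc → Spec_strip_timestamps_py lrc (strip_timestamps_py lrc)

-- ===== LEMMAS AND PROOFS =====

theorem pvMIdle (l : List Char) (j keep : Int) (h : keep < j) :
    (PySem.List.enumerate l j).foldl pvStepB (keep, false) = (keep, false) := by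
  induction l generalizing j with
  | nil => simp [PySem.List.enumerate]
  | cons c rest ih =>
    rw [PySem.List.enumerate_cons, List.foldl_cons]
    have : pvStepB (keep, false) (j, c) = (keep, false) := by
      simp [pvStepB]; omega
    rw [this]; exact ih (j+1) (by omega)

theorem pvMStuck (l : List Char) (j keep : Int) (h : ']' ∉ l) :
    (PySem.List.enumerate l j).foldl pvStepB (keep, true) = (keep, true) := by
  induction l generalizing j with
  | nil => simp [PySem.List.enumerate]
  | cons c rest ih =>
    rw [PySem.List.enumerate_cons, List.foldl_cons]
    have hc : c ≠ ']' := fun he => h (he ▸ List.mem_cons_self)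
    have : pvStepB (keep, true) (j, c) = (keep, true) := by simp [pvStepB, hc]
    rw [this]; exact ih (j+1) (fun hm => h (List.mem_cons_of_mem _ hm))

theorem pvMSpaces (w : List Char) (j : Int) (hw : ∀ c ∈ w, PySem.Chars.isspace c = true) :
    (PySem.List.enumerate w j).foldl pvStepB (j, false) = (j + w.length, false) := by
  induction w generalizing j with
  | nil => simp [PySem.List.enumerate]
  | cons c rest ih =>
    rw [PySem.List.enumerate_cons, List.foldl_cons]
    have hsp : PySem.Chars.isspace c = true := hw c List.mem_cons_self
    have hbr : c ≠ '[' := by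
      intro he; rw [he] at hsp; exact absurd hsp (by decide)
    have : pvStepB (j, false) (j, c) = (j + 1, false) := by simp [pvStepB, hbr, hsp]
    rw [this]
    rw [ih (j+1) (fun c hc => hw c (List.mem_cons_of_mem _ hc))]
    simp; ring

theorem pvMainN (n : Nat) : ∀ (s : List Char), s.length ≤ n → ∀ (k : Int),
    PySem.Chars.lstrip s = s →
    k ≤ ((PySem.List.enumerate s k).foldl pvStepB (k, false)).1 ∧
    peelA s = s.drop (((((PySem.List.enumerate s k).foldl pvStepB (k, false)).1 - k)).toNat) := by
  induction n with
  | zero =>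
    intro s hlen k _
    have : s = [] := List.eq_nil_of_length_eq_zero (by omega)
    subst this
    rw [peelA]
    simp [PySem.List.enumerate, PySem.Chars.startswith]
  | succ n ih =>
    intro s hlen k hs
    match s with
    | [] =>
      rw [peelA]
      simp [PySem.List.enumerate, PySem.Chars.startswith]
    | c :: rest =>
      by_cases hc : c = '['
      · subst hc
        rw [PySem.List.enumerate_cons, List.foldl_cons]
        have hstep : pvStepB (k, false) (k, '[') = (k, true) := by simp [pvStepB]
        rw [hstep]
        by_cases hm : ']' ∈ rest
        · -- closed block: rest = t ++ ']' :: u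
          set t := rest.takeWhile (· ≠ ']') with ht
          have hdne : rest.dropWhile (· ≠ ']') ≠ [] := by
            intro he
            have h1 := List.takeWhile_append_dropWhile (p := (· ≠ ']')) (l := rest)
            rw [he, List.append_nil] at h1
            have := List.mem_takeWhile_imp (l := rest) (p := (· ≠ ']')) (by rw [h1]; exact hm)
            simp at this
          have hhead : (rest.dropWhile (· ≠ ']')).head hdne = ']' := by
            have := List.head_dropWhile_not (p := (· ≠ ']')) (l := rest) hdne
            simpa using this
          set u := (rest.dropWhile (· ≠ ']')).tail with hu
          have hdw : rest.dropWhile (· ≠ ']') = ']' :: u := by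
            conv_lhs => rw [← List.cons_head_tail hdne]
            rw [hhead]
          have hrest : rest = t ++ ']' :: u := by
            conv_lhs => rw [← List.takeWhile_append_dropWhile (p := (· ≠ ']')) (l := rest)]
            rw [hdw]
          have htne : ']' ∉ t := by
            intro hmem
            have := List.mem_takeWhile_imp hmem
            simp at this
          set w := u.takeWhile PySem.Chars.isspace with hw
          set v := u.dropWhile PySem.Chars.isspace with hv
          have huwv : u = w ++ v := (List.takeWhile_append_dropWhile).symm
          -- machine trace
          rw [hrest, PySem.List.enumerate_append, List.foldl_append]
          rw [pvMStuck t _ _ htne]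
          rw [PySem.List.enumerate_cons, List.foldl_cons]
          have hstep2 : pvStepB (k, true) (k + 1 + (t.length : Int), ']') = (k + 1 + t.length + 1, false) := by
            simp [pvStepB]
          rw [hstep2]
          rw [huwv, PySem.List.enumerate_append, List.foldl_append]
          have hwsp : ∀ c ∈ w, PySem.Chars.isspace c = true := fun c hc => List.mem_takeWhile_imp hc
          rw [pvMSpaces w _ hwsp]
          have hvs : PySem.Chars.lstrip v = v := by
            rw [hv, PySem.Chars.lstrip, List.dropWhile_idempotent]
          have hvlen : v.length ≤ n := by
            have h1 : v.length ≤ u.length := by rw [huwv]; simp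
            have h2 : rest.length = t.length + 1 + u.length := by rw [hrest]; simp; omega
            simp at hlen; omega
          have hcast : (k + 1 + (t.length:Int) + 1 + (w.length:Int)) = k + (1 + t.length + 1 + w.length : Nat) := by
            push_cast; ring
          obtain ⟨hle, hpeel⟩ := ih v hvlen (k + 1 + t.length + 1 + w.length) hvs
          set F := (PySem.List.enumerate v (k + 1 + (t.length:Int) + 1 + (w.length:Int))).foldl pvStepB
            (k + 1 + (t.length:Int) + 1 + (w.length:Int), false) with hF
          constructor
          · omega
          · rw [peelA]
            have hmem : ']' ∈ ('[' :: (t ++ ']' :: (w ++ v))) := by simp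
            have hguard : (PySem.Chars.startswith ('[' :: (t ++ ']' :: (w ++ v))) ['['] &&
                PySem.Chars.isIn [']'] ('[' :: (t ++ ']' :: (w ++ v)))) = true := by
              simp [PySem.Chars.startswith, List.isPrefixOf, (pvIsInMem ']' _).mpr hmem]
            rw [dif_pos hguard]
            have htW : ∀ x ∈ t, (fun x => decide (x ≠ ']')) x = true := by
              intro x hx; simp; intro he; exact htne (he ▸ hx)
            have hdwt : List.dropWhile (fun x => decide (x ≠ ']')) t = [] :=
              List.dropWhile_eq_nil_iff.mpr (by intro x hx; exact htW x hx)
            have hdwS : List.dropWhile (fun x => decide (x ≠ ']')) ('[' :: (t ++ ']' :: (w ++ v)))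
                = ']' :: (w ++ v) := by
              rw [List.dropWhile_cons]
              simp only [List.dropWhile_append, hdwt]
              simp
            have hdww : List.dropWhile PySem.Chars.isspace w = [] :=
              List.dropWhile_eq_nil_iff.mpr (by intro x hx; exact hwsp x hx)
            have harg : PySem.Chars.lstrip
                ((PySem.List.pyGet? (PySem.Chars.splitOnMax ('[' :: (t ++ ']' :: (w ++ v))) [']'] 1) 1).getD []) = v := by
              rw [pvSplitChar _ hmem]
              have hget : (PySem.List.pyGet? [('[' :: (t ++ ']' :: (w ++ v))).takeWhile (· ≠ ']'),
                  (('[' :: (t ++ ']' :: (w ++ v))).dropWhile (· ≠ ']')).tail] (1:Int)).getD []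
                  = (('[' :: (t ++ ']' :: (w ++ v))).dropWhile (· ≠ ']')).tail := by
                simp [PySem.List.pyGet?, PySem.List.pyIdx?]
              rw [hget]
              show PySem.Chars.lstrip (List.dropWhile (fun x => decide (x ≠ ']')) ('[' :: (t ++ ']' :: (w ++ v)))).tail = v
              rw [hdwS]
              show List.dropWhile PySem.Chars.isspace (w ++ v) = v
              rw [List.dropWhile_append, hdww]
              simp [hv, List.dropWhile_idempotent]
            rw [harg, hpeel]
            have hSv : List.drop (2 + t.length + w.length) ('[' :: (t ++ ']' :: (w ++ v))) = v := by
              have hS : ('[' :: (t ++ ']' :: (w ++ v))) = ('[' :: t ++ ']' :: w) ++ v := by simp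
              rw [hS]
              have hlen2 : ('[' :: t ++ ']' :: w).length = 2 + t.length + w.length := by simp; omega
              rw [← hlen2, List.drop_left]
            have hsplit : (F.1 - k).toNat = (2 + t.length + w.length) + (F.1 - (k + 1 + (t.length:Int) + 1 + (w.length:Int))).toNat := by
              omega
            rw [hsplit, ← List.drop_drop, hSv]
        · -- unclosed: machine stays open, peelA returns s
          rw [pvMStuck rest _ _ hm]
          refine ⟨le_refl _, ?_⟩
          rw [peelA]
          have hnm : ']' ∉ '[' :: rest := by simp [hm]
          have : PySem.Chars.isIn [']'] ('[' :: rest) = false := by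
            rw [← Bool.not_eq_true, (pvIsInMem ']' _)]; exact hnm
          simp only [this, Bool.and_false, dite_false]
          simp
      · -- first char is not '[': machine idles, peelA returns s
        have hcsp : PySem.Chars.isspace c = false := by
          by_contra hsp
          simp only [Bool.not_eq_false] at hsp
          have := hs
          rw [PySem.Chars.lstrip, List.dropWhile_cons, if_pos hsp] at this
          have hl := List.length_dropWhile_le (p := PySem.Chars.isspace) (l := rest)
          rw [this] at hl
          simp at hl
        rw [PySem.List.enumerate_cons, List.foldl_cons]
        have hstep : pvStepB (k, false) (k, c) = (k, false) := by
          simp [pvStepB, hc, hcsp]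
        rw [hstep, pvMIdle rest (k+1) k (by omega)]
        refine ⟨le_refl _, ?_⟩
        rw [peelA]
        have : PySem.Chars.startswith (c :: rest) ['['] = false := by
          simp [PySem.Chars.startswith, List.isPrefixOf]
          intro h; exact absurd h.symm hc
        simp only [this, Bool.false_and, dite_false]
        simp

theorem pvLstripStrip (x : List Char) :
    PySem.Chars.lstrip (PySem.Chars.strip x) = PySem.Chars.strip x := by
  rw [PySem.Chars.strip]
  set y := PySem.Chars.lstrip x with hy
  have hyl : PySem.Chars.lstrip y = y := by
    rw [hy, PySem.Chars.lstrip, PySem.Chars.lstrip, List.dropWhile_idempotent]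
  have hpre : PySem.Chars.rstrip y <+: y := by
    rw [PySem.Chars.rstrip]
    have := List.dropWhile_suffix (l := y.reverse) (p := PySem.Chars.isspace)
    rw [← List.reverse_prefix] at this
    simpa using this
  rcases he : PySem.Chars.rstrip y with _ | ⟨a, as⟩
  · simp [PySem.Chars.lstrip]
  · obtain ⟨tl, htl⟩ := hpre
    rw [he] at htl
    have ha : PySem.Chars.isspace a = false := by
      by_contra hsp
      simp only [Bool.not_eq_false] at hsp
      have : y = a :: (as ++ tl) := by rw [← htl]; simp
      rw [this, PySem.Chars.lstrip, List.dropWhile_cons, if_pos hsp] at hyl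
      have := List.length_dropWhile_le (p := PySem.Chars.isspace) (l := as ++ tl)
      rw [hyl] at this
      simp at this
    rw [PySem.Chars.lstrip, List.dropWhile_cons, if_neg (by simp [ha])]

theorem pvFoldlShape (L : List (List Char)) (f : List Char → List Char) (acc : List (List Char)) :
    L.foldl (fun acc r =>
      let line := PySem.Chars.strip r
      if line = [] then acc else acc ++ [f line]) acc
    = acc ++ ((L.map PySem.Chars.strip).filter (fun l => !l.isEmpty)).map f := by
  induction L generalizing acc with
  | nil => simp
  | cons r Lr ih =>
    simp only [List.foldl_cons, List.map_cons, List.filter_cons]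
    by_cases hE : PySem.Chars.strip r = []
    · simp [hE, ih]
    · have : (!(PySem.Chars.strip r).isEmpty) = true := by simp [hE]
      rw [if_neg hE, this]
      simp only [ih, List.map_cons]
      simp

theorem pvCutEqPeel (l : List Char) (hl : PySem.Chars.lstrip l = l) :
    cutB l = peelA l := by
  obtain ⟨hle, hpeel⟩ := pvMainN l.length l (le_refl _) 0 hl
  rw [cutB]
  rw [PySem.Chars.slice_eq_listSlice, PySem.List.slice_from _ hle]
  rw [hpeel]
  norm_num

theorem pvFinal (lrc : String) : strip_timestamps_py lrc = strip_timestamps_py_alt lrc := by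
  rw [strip_timestamps_py, strip_timestamps_py_alt]
  simp only [pvFoldlShape, List.nil_append]
  congr 3
  apply List.map_congr_left
  intro l hl
  have hmem := List.mem_filter.mp hl
  obtain ⟨raw, _, hraw⟩ := List.mem_map.mp hmem.1
  exact (pvCutEqPeel l (by rw [← hraw]; exact pvLstripStrip raw)).symm

-- ===== VERDICT (by name: the statement is the Claim_ definition above) =====
theorem strip_timestamps_py_spec : Claim_equal_strip_timestamps_py := by
  unfold Claim_equal_strip_timestamps_py Spec_strip_timestamps_py
  exact fun lrc _ => pvFinal lrc
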